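-- pv_equiv track=rewrite | github.com/vinchinzu/euler | python/983.py | opposite_pairs
-- ===== SOURCE A (Python) =====
-- from typing import Dict, List, Sequence, Tuple
--
-- Point = Tuple[int, int]
--
-- def opposite_pairs(points: Sequence[Point]) -> List[Tuple[Point, Point]]:
--     pairs: List[Tuple[Point, Point]] = []
--     used = set()
--     for v in sorted(points):
--         if v in used:
--             continue
--         w = (-v[0], -v[1])
--         used.add(v)
--         used.add(w)
--         pairs.append((v, w))
--     return pairs
-- ===== SOURCE B (Python) =====
-- from typing import List, Sequence, Tuple
--
-- Point = Tuple[int, int]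
--
-- def opposite_pairs(points: Sequence[Point]) -> List[Tuple[Point, Point]]:
--     # Group points into orbits {p, -p} keyed by the orbit's canonical element
--     # min(p, -p), keeping for each orbit the smallest input point seen; the
--     # answer is that representative paired with its negation, orbit reps sorted.
--     best = {}
--     for p in points:
--         c = min(p, (-p[0], -p[1]))
--         b = best.get(c)
--         if b is None or p < b:
--             best[c] = p
--     return [(v, (-v[0], -v[1])) for v in sorted(best.values())]
-- ===== Notes on version B (the rewrite author's own statement) =====
-- stated objective: alternative
-- what changed: Replaced A's sort-then-greedy pass that consumes points with a mutable 'used' set by an orbit-grouping algorithm: one dict pass keeps, per orbit {p,-p} keyed by min(p,-p), the smallest input point, then sorts only the representatives and maps each to its pair.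
import Mathlib
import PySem

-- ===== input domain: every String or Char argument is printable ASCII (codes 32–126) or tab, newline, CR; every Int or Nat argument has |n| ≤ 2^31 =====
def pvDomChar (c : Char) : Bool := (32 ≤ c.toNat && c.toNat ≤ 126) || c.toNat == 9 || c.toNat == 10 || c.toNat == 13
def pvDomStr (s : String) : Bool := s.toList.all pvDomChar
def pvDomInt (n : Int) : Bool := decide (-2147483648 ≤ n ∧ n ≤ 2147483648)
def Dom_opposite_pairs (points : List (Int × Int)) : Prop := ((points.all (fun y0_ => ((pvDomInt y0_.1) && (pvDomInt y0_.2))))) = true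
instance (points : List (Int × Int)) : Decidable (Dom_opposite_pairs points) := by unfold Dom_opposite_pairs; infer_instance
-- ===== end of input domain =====

-- B replaces A's sort-then-greedy pass with its mutable 'used' set by a different algorithm:
-- one dict pass groups points into orbits {p, -p} keyed by min(p, -p), keeping per orbit the
-- smallest input point, then sorts only those representatives and pairs each with its negation.

-- ===== PORT A =====
-- sorted(points) on int 2-tuples compares lexicographically: PySem.List.sorted2 fst snd.
def opposite_pairs (points : List (Int × Int)) : List ((Int × Int) × (Int × Int)) :=
  (List.foldl
    (fun (st : List ((Int × Int) × (Int × Int)) × PySem.Set (Int × Int)) v =>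
      if PySem.Set.contains st.2 v then st
      else
        let w : Int × Int := (-v.1, -v.2)
        (st.1 ++ [(v, w)], PySem.Set.add (PySem.Set.add st.2 v) w))
    (([], PySem.Set.empty) : List ((Int × Int) × (Int × Int)) × PySem.Set (Int × Int))
    (PySem.List.sorted2 points Prod.fst Prod.snd)).1

-- ===== PORT B =====
-- Python's '<' on int 2-tuples, exactly: lexicographic comparison.
def pyTupLt (a b : Int × Int) : Bool :=
  decide (a.1 < b.1) || (decide (a.1 = b.1) && decide (a.2 < b.2))

def opposite_pairs_alt (points : List (Int × Int)) : List ((Int × Int) × (Int × Int)) :=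
  let best :=
    List.foldl
      (fun (d : PySem.Dict (Int × Int) (Int × Int)) p =>
        -- c = min(p, (-p[0], -p[1])): Python's min returns its second argument iff strictly smaller
        let c : Int × Int := if pyTupLt (-p.1, -p.2) p then (-p.1, -p.2) else p
        -- b = best.get(c); if b is None or p < b: best[c] = p
        match PySem.Dict.get? d c with
        | none => PySem.Dict.insert d c p
        | some b => if pyTupLt p b then PySem.Dict.insert d c p else d)
      PySem.Dict.empty points
  (PySem.List.sorted2 (PySem.Dict.values best) Prod.fst Prod.snd).map
    (fun v => (v, ((-v.1, -v.2) : Int × Int)))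

-- ===== PRECONDITION & SPEC =====
def Spec_opposite_pairs (points : List (Int × Int)) (out : List ((Int × Int) × (Int × Int))) : Prop := out = opposite_pairs_alt points
instance (points : List (Int × Int)) (out : List ((Int × Int) × (Int × Int))) : Decidable (Spec_opposite_pairs points out) := by unfold Spec_opposite_pairs; infer_instance

-- ===== CLAIM (what is proved, stated in full; the proofs are below) =====
def Claim_equal_opposite_pairs : Prop := ∀ (points : List (Int × Int)), Dom_opposite_pairs points → Spec_opposite_pairs points (opposite_pairs points)

-- ===== LEMMAS AND PROOFS =====

-- the negation point
def negp (v : Int × Int) : Int × Int := (-v.1, -v.2)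

theorem negp_negp (v : Int × Int) : negp (negp v) = v := by
  simp [negp]

theorem negp_eq_iff (u v : Int × Int) : negp u = v ↔ u = negp v := by
  constructor <;> intro h
  · rw [← h, negp_negp]
  · rw [h, negp_negp]

-- Python's tuple-sort of int pairs is the sort by the lexicographic (Lex) key.
theorem sorted2_eq_sorted_lex (xs : List (Int × Int)) :
    PySem.List.sorted2 xs Prod.fst Prod.snd
      = PySem.List.sorted xs (fun p => toLex p) := by
  have hb : ∀ a b : Int × Int,
      (decide (a.1 < b.1) || (!decide (b.1 < a.1) && decide (a.2 < b.2)))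
        = decide (toLex a < toLex b) := by
    intro a b
    have hlt : (toLex a < toLex b) ↔ (a.1 < b.1 ∨ a.1 = b.1 ∧ a.2 < b.2) := Prod.Lex.lt_iff
    by_cases h1 : a.1 < b.1 <;> by_cases h2 : b.1 < a.1 <;> by_cases h3 : a.2 < b.2 <;>
      simp [h1, h2, h3, hlt] <;> omega
  simp only [PySem.List.sorted2, PySem.List.sorted, hb]

theorem pyTupLt_eq_decide_lex (a b : Int × Int) :
    pyTupLt a b = decide (toLex a < toLex b) := by
  have hlt : (toLex a < toLex b) ↔ (a.1 < b.1 ∨ a.1 = b.1 ∧ a.2 < b.2) := Prod.Lex.lt_iff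
  by_cases h1 : a.1 < b.1 <;> by_cases h2 : a.1 = b.1 <;> by_cases h3 : a.2 < b.2 <;>
    simp [pyTupLt, h1, h2, h3, hlt]

-- A's loop with the 'used' set abstracted away: only the list of processed points matters,
-- because at any time used = { u : u processed or negp u processed }.
def gA (P : List (Int × Int)) : List (Int × Int) → List ((Int × Int) × (Int × Int))
  | [] => []
  | v :: L =>
    if v ∈ P ∨ negp v ∈ P then gA (v :: P) L else (v, negp v) :: gA (v :: P) L

theorem foldA_eq_gA (L : List (Int × Int)) (P : List (Int × Int))
    (acc : List ((Int × Int) × (Int × Int))) (used : PySem.Set (Int × Int))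
    (hu : ∀ u, u ∈ used ↔ u ∈ P ∨ negp u ∈ P) :
    (List.foldl
      (fun (st : List ((Int × Int) × (Int × Int)) × PySem.Set (Int × Int)) v =>
        if PySem.Set.contains st.2 v then st
        else
          let w : Int × Int := (-v.1, -v.2)
          (st.1 ++ [(v, w)], PySem.Set.add (PySem.Set.add st.2 v) w))
      (acc, used) L).1 = acc ++ gA P L := by
  induction L generalizing P acc used with
  | nil => simp [gA]
  | cons v L ih =>
    rw [List.foldl_cons]
    by_cases h : v ∈ P ∨ negp v ∈ P
    · have hc : PySem.Set.contains used v = true :=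
        List.contains_iff_mem.mpr ((hu v).mpr h)
      have hu' : ∀ u, u ∈ used ↔ u ∈ v :: P ∨ negp u ∈ v :: P := by
        intro u
        rw [hu u]
        simp only [List.mem_cons, negp_eq_iff]
        constructor
        · tauto
        · rintro ((rfl | h1) | h2)
          · exact h
          · exact Or.inl h1
          · rcases h2 with rfl | h2
            · rw [negp_negp]
              tauto
            · exact Or.inr h2
      simp only [hc, if_true, gA, if_pos h]
      exact ih (v :: P) acc used hu'
    · have hc : PySem.Set.contains used v = false :=
        Bool.eq_false_iff.mpr (fun hx => h ((hu v).mp (List.contains_iff_mem.mp hx)))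
      have hu' : ∀ u, u ∈ PySem.Set.add (PySem.Set.add used v) (negp v)
          ↔ u ∈ v :: P ∨ negp u ∈ v :: P := by
        intro u
        rw [PySem.Set.mem_add, PySem.Set.mem_add, hu u]
        simp only [List.mem_cons, negp_eq_iff]
        tauto
      simp only [hc, Bool.false_eq_true, if_false, gA, if_neg h]
      have hrec := ih (v :: P) (acc ++ [(v, negp v)])
        (PySem.Set.add (PySem.Set.add used v) (negp v)) hu'
      have hshape : acc ++ (v, negp v) :: gA (v :: P) L
          = (acc ++ [(v, negp v)]) ++ gA (v :: P) L := by simp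
      rw [hshape]
      exact hrec

-- ordered dedup of L relative to the already-seen set P
def ddup (P : List (Int × Int)) : List (Int × Int) → List (Int × Int)
  | [] => []
  | v :: L => if v ∈ P then ddup P L else v :: ddup (v :: P) L

theorem mem_ddup (L : List (Int × Int)) (P : List (Int × Int)) (u : Int × Int) :
    u ∈ ddup P L ↔ u ∈ L ∧ u ∉ P := by
  induction L generalizing P with
  | nil => simp [ddup]
  | cons v L ih =>
    by_cases h : v ∈ P
    · simp only [ddup, if_pos h, ih, List.mem_cons]
      constructor
      · tauto
      · rintro ⟨rfl | h1, h2⟩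
        · exact absurd h h2
        · exact ⟨h1, h2⟩
    · simp only [ddup, if_neg h, List.mem_cons, ih]
      constructor
      · rintro (rfl | ⟨h1, h2⟩)
        · exact ⟨Or.inl rfl, h⟩
        · exact ⟨Or.inr h1, fun hP => h2 (Or.inr hP)⟩
      · rintro ⟨h1 | h1, h2⟩
        · exact Or.inl h1
        · by_cases hv : u = v
          · exact Or.inl hv
          · exact Or.inr ⟨h1, by simp [hv, h2]⟩

theorem ddup_sublist (L : List (Int × Int)) (P : List (Int × Int)) :
    (ddup P L).Sublist L := by
  induction L generalizing P with
  | nil => simp [ddup]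
  | cons v L ih =>
    by_cases h : v ∈ P
    · simpa [ddup, h] using (ih P).cons v
    · simpa [ddup, h] using (ih (v :: P)).cons₂ v

theorem nodup_ddup (L : List (Int × Int)) (P : List (Int × Int)) :
    (ddup P L).Nodup := by
  induction L generalizing P with
  | nil => simp [ddup]
  | cons v L ih =>
    by_cases h : v ∈ P
    · simpa [ddup, h] using ih P
    · simp only [ddup, if_neg h, List.nodup_cons]
      refine ⟨fun hv => ?_, ih (v :: P)⟩
      exact ((mem_ddup L (v :: P) v).mp hv).2 (List.mem_cons_self ..)

theorem ddup_congr (L : List (Int × Int)) (P P' : List (Int × Int))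
    (h : ∀ u, u ∈ P ↔ u ∈ P') : ddup P L = ddup P' L := by
  induction L generalizing P P' with
  | nil => simp [ddup]
  | cons v L ih =>
    by_cases hv : v ∈ P
    · simp only [ddup, if_pos hv, if_pos ((h v).mp hv)]
      exact ih P P' h
    · simp only [ddup, if_neg hv, if_neg (fun hv' => hv ((h v).mpr hv'))]
      refine congrArg _ (ih (v :: P) (v :: P') fun u => ?_)
      simp [List.mem_cons, h u]

-- The heart of the A side: on a lexicographically nondecreasing remainder L (with the
-- processed prefix P below it, P and L together covering pts), A's greedy consumption loop
-- emits exactly the first occurrences v whose negation is not a strictly smaller member of pts.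
theorem gA_char (pts : List (Int × Int)) (L : List (Int × Int)) (P : List (Int × Int))
    (hsort : L.Pairwise (fun a b => toLex a ≤ toLex b))
    (hPL : ∀ p ∈ P, ∀ x ∈ L, toLex p ≤ toLex x)
    (hmem : ∀ u, u ∈ pts ↔ u ∈ P ∨ u ∈ L) :
    gA P L = ((ddup P L).filter
        (fun v => decide ¬(negp v ∈ pts ∧ toLex (negp v) < toLex v))).map
      (fun v => (v, negp v)) := by
  induction L generalizing P with
  | nil => simp [gA, ddup]
  | cons v L ih =>
    have htail : ∀ x ∈ L, toLex v ≤ toLex x := fun x hx => (List.pairwise_cons.mp hsort).1 x hx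
    have hsort' : L.Pairwise (fun a b => toLex a ≤ toLex b) := (List.pairwise_cons.mp hsort).2
    have hPL' : ∀ p ∈ v :: P, ∀ x ∈ L, toLex p ≤ toLex x := by
      intro p hp x hx
      rcases List.mem_cons.mp hp with rfl | hp
      · exact htail x hx
      · exact hPL p hp x (List.mem_cons_of_mem _ hx)
    have hmem' : ∀ u, u ∈ pts ↔ u ∈ v :: P ∨ u ∈ L := by
      intro u
      rw [hmem u]
      simp only [List.mem_cons]
      tauto
    by_cases hvP : v ∈ P
    · -- duplicate of an already-processed point
      have hdd : ddup P (v :: L) = ddup (v :: P) L := by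
        rw [show ddup P (v :: L) = ddup P L from by simp [ddup, hvP]]
        refine ddup_congr L P (v :: P) fun u => ?_
        simp only [List.mem_cons]
        constructor
        · exact Or.inr
        · rintro (rfl | h1)
          · exact hvP
          · exact h1
      rw [show gA P (v :: L) = gA (v :: P) L from by simp [gA, hvP], hdd]
      exact ih (v :: P) hsort' hPL' hmem'
    · by_cases hnP : negp v ∈ P
      · -- negation was processed earlier: v is skipped, and the filter drops it
        have hlt : toLex (negp v) < toLex v := by
          have hle : toLex (negp v) ≤ toLex v :=
            hPL (negp v) hnP v (List.mem_cons_self ..)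
          refine lt_of_le_of_ne hle fun he => ?_
          have heq : negp v = v := toLex.injective he
          rw [heq] at hnP
          exact hvP hnP
        have hin : negp v ∈ pts := (hmem (negp v)).mpr (Or.inl hnP)
        rw [show gA P (v :: L) = gA (v :: P) L from by simp [gA, hvP, hnP]]
        rw [show ddup P (v :: L) = v :: ddup (v :: P) L from by simp [ddup, hvP]]
        rw [List.filter_cons, decide_eq_false (fun hn => hn ⟨hin, hlt⟩),
          if_neg Bool.false_ne_true]
        exact ih (v :: P) hsort' hPL' hmem'
      · -- fresh pair: emitted by A, kept by the filter
        have hkeep : ¬(negp v ∈ pts ∧ toLex (negp v) < toLex v) := by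
          rintro ⟨hin, hlt⟩
          rcases (hmem (negp v)).mp hin with h1 | h1
          · exact hnP h1
          · rcases List.mem_cons.mp h1 with h1 | h1
            · rw [h1] at hlt
              exact lt_irrefl _ hlt
            · exact absurd hlt (not_lt.mpr (htail (negp v) h1))
        rw [show gA P (v :: L) = (v, negp v) :: gA (v :: P) L from by simp [gA, hvP, hnP]]
        rw [show ddup P (v :: L) = v :: ddup (v :: P) L from by simp [ddup, hvP]]
        rw [List.filter_cons, decide_eq_true hkeep, if_pos rfl, List.map_cons]
        exact congrArg _ (ih (v :: P) hsort' hPL' hmem')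

-- ===== the B side: the min-per-orbit dict =====

-- the canonical orbit key min(p, -p)
def canonp (p : Int × Int) : Int × Int := if toLex (negp p) < toLex p then negp p else p

theorem canonp_negp (v : Int × Int) : canonp (negp v) = canonp v := by
  unfold canonp
  rw [negp_negp]
  rcases lt_trichotomy (toLex (negp v)) (toLex v) with h | h | h
  · rw [if_pos h, if_neg (not_lt.mpr (le_of_lt h))]
  · have he : negp v = v := toLex.injective h
    simp [he]
  · rw [if_neg (not_lt.mpr (le_of_lt h)), if_pos h]

theorem canonp_cases (p : Int × Int) : canonp p = p ∨ canonp p = negp p := by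
  unfold canonp
  split_ifs <;> simp

theorem canonp_eq_iff (q v : Int × Int) : canonp q = canonp v ↔ q = v ∨ q = negp v := by
  constructor
  · intro h
    rcases canonp_cases q with h1 | h1 <;> rcases canonp_cases v with h2 | h2
    · left
      rw [← h1, h, h2]
    · right
      rw [← h1, h, h2]
    · right
      have hq : q = negp (canonp q) := by rw [h1, negp_negp]
      rw [hq, h, h2]
    · left
      have hq : q = negp (canonp q) := by rw [h1, negp_negp]
      rw [hq, h, h2, negp_negp]
  · rintro (rfl | rfl)
    · rfl
    · exact canonp_negp v

-- the port's fold step, named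
def stepB (d : PySem.Dict (Int × Int) (Int × Int)) (p : Int × Int) :
    PySem.Dict (Int × Int) (Int × Int) :=
  let c : Int × Int := if pyTupLt (-p.1, -p.2) p then (-p.1, -p.2) else p
  match PySem.Dict.get? d c with
  | none => PySem.Dict.insert d c p
  | some b => if pyTupLt p b then PySem.Dict.insert d c p else d

theorem stepB_key (p : Int × Int) :
    (if pyTupLt (-p.1, -p.2) p then ((-p.1, -p.2) : Int × Int) else p) = canonp p := by
  rw [show ((-p.1, -p.2) : Int × Int) = negp p from rfl, pyTupLt_eq_decide_lex]
  unfold canonp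
  by_cases h : toLex (negp p) < toLex p <;> simp [h]

theorem stepB_none (d : PySem.Dict (Int × Int) (Int × Int)) (p : Int × Int)
    (h : PySem.Dict.get? d (canonp p) = none) :
    stepB d p = PySem.Dict.insert d (canonp p) p := by
  simp only [stepB, stepB_key, h]

theorem stepB_some_lt (d : PySem.Dict (Int × Int) (Int × Int)) (p b : Int × Int)
    (h : PySem.Dict.get? d (canonp p) = some b) (hlt : pyTupLt p b = true) :
    stepB d p = PySem.Dict.insert d (canonp p) p := by
  simp only [stepB, stepB_key, h, hlt, if_true]

theorem stepB_some_ge (d : PySem.Dict (Int × Int) (Int × Int)) (p b : Int × Int)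
    (h : PySem.Dict.get? d (canonp p) = some b) (hlt : pyTupLt p b = false) :
    stepB d p = d := by
  simp only [stepB, stepB_key, h, hlt, Bool.false_eq_true, if_false]

-- the invariant of the dict fold
def InvB (d : PySem.Dict (Int × Int) (Int × Int)) (P : List (Int × Int)) : Prop :=
  d.keys.Nodup ∧
  (∀ kv ∈ d.items, kv.1 = canonp kv.2 ∧ kv.2 ∈ P ∧
      ∀ p ∈ P, canonp p = kv.1 → toLex kv.2 ≤ toLex p) ∧
  (∀ p ∈ P, PySem.Dict.contains d (canonp p) = true)

-- common shape: inserting the new orbit minimum p (at key canonp p) preserves the invariant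
theorem invB_insert (P : List (Int × Int)) (d : PySem.Dict (Int × Int) (Int × Int))
    (p : Int × Int) (hnd : d.keys.Nodup)
    (hitems : ∀ kv ∈ d.items, kv.1 = canonp kv.2 ∧ kv.2 ∈ P ∧
      ∀ q ∈ P, canonp q = kv.1 → toLex kv.2 ≤ toLex q)
    (hcont : ∀ q ∈ P, PySem.Dict.contains d (canonp q) = true)
    (hmin : ∀ q ∈ P, canonp q = canonp p → toLex p ≤ toLex q) :
    InvB (PySem.Dict.insert d (canonp p) p) (P ++ [p]) := by
  refine ⟨PySem.Dict.nodup_keys_insert d _ _ hnd, ?_, ?_⟩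
  · intro kv hkv
    rcases (PySem.Dict.mem_items_insert ..).mp hkv with rfl | ⟨hkv, hne⟩
    · refine ⟨rfl, by simp, ?_⟩
      intro q hq hc
      have hc' : canonp q = canonp p := hc
      rcases List.mem_append.mp hq with hq | hq
      · exact hmin q hq hc'
      · simp only [List.mem_singleton] at hq
        subst hq
        exact le_refl _
    · obtain ⟨h1, h2, h3⟩ := hitems kv hkv
      refine ⟨h1, List.mem_append_left _ h2, ?_⟩
      intro q hq hc
      rcases List.mem_append.mp hq with hq | hq
      · exact h3 q hq hc
      · simp only [List.mem_singleton] at hq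
        subst hq
        exact absurd hc hne.symm
  · intro q hq
    rcases List.mem_append.mp hq with hq | hq
    · rw [PySem.Dict.contains_insert]
      simp [hcont q hq]
    · simp only [List.mem_singleton] at hq
      subst hq
      exact PySem.Dict.contains_insert_self ..

theorem invB_fold (L : List (Int × Int)) (P : List (Int × Int))
    (d : PySem.Dict (Int × Int) (Int × Int)) (h : InvB d P) :
    InvB (List.foldl stepB d L) (P ++ L) := by
  induction L generalizing P d with
  | nil => simpa using h
  | cons p L ih =>
    obtain ⟨hnd, hitems, hcont⟩ := h
    have hstep : InvB (stepB d p) (P ++ [p]) := by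
      rcases hg : PySem.Dict.get? d (canonp p) with _ | b
      · -- fresh orbit: insert (canonp p, p)
        have hnc : d.contains (canonp p) = false := by
          rw [PySem.Dict.contains_eq_isSome_get?, hg]
          rfl
        rw [stepB_none d p hg]
        refine invB_insert P d p hnd hitems hcont ?_
        intro q hq hc
        exfalso
        have h4 := hcont q hq
        rw [hc, hnc] at h4
        exact Bool.false_ne_true h4
      · have hb : (canonp p, b) ∈ d.items := PySem.Dict.mem_items_of_get?_eq_some d hg
        obtain ⟨hb1, hb2, hb3⟩ := hitems _ hb
        by_cases hlt : pyTupLt p b = true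
        · -- p improves on the stored representative b: overwrite
          have hplt : toLex p < toLex b := by
            rw [pyTupLt_eq_decide_lex] at hlt
            exact of_decide_eq_true hlt
          rw [stepB_some_lt d p b hg hlt]
          refine invB_insert P d p hnd hitems hcont ?_
          intro q hq hc
          exact le_of_lt (lt_of_lt_of_le hplt (hb3 q hq hc))
        · -- p does not improve: dict unchanged
          rw [stepB_some_ge d p b hg (Bool.eq_false_iff.mpr hlt)]
          have hble : toLex b ≤ toLex p := by
            rw [pyTupLt_eq_decide_lex, decide_eq_true_eq] at hlt
            exact le_of_not_gt hlt
          refine ⟨hnd, ?_, ?_⟩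
          · intro kv hkv
            obtain ⟨h1, h2, h3⟩ := hitems kv hkv
            refine ⟨h1, List.mem_append_left _ h2, ?_⟩
            intro q hq hc
            rcases List.mem_append.mp hq with hq | hq
            · exact h3 q hq hc
            · simp only [List.mem_singleton] at hq
              subst hq
              have hkb : kv.2 = b := by
                have hg2 : d.get? kv.1 = some kv.2 :=
                  PySem.Dict.get?_of_mem_items d hkv hnd
                rw [hc] at hg
                rw [hg] at hg2
                exact Option.some.inj hg2.symm
              rw [hkb]
              exact hble
          · intro q hq
            rcases List.mem_append.mp hq with hq | hq
            · exact hcont q hq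
            · simp only [List.mem_singleton] at hq
              subst hq
              rw [PySem.Dict.contains_eq_isSome_get?, hg]
              rfl
    have := ih (P ++ [p]) (stepB d p) hstep
    simpa [List.append_assoc] using this

theorem invB_empty : InvB PySem.Dict.empty [] := by
  refine ⟨by simp [PySem.Dict.keys_empty], ?_, by simp⟩
  intro kv hkv
  simp [PySem.Dict.empty] at hkv

-- membership in the values of the final dict: exactly the kept orbit minima
theorem mem_values_best (pts : List (Int × Int))
    (d : PySem.Dict (Int × Int) (Int × Int)) (h : InvB d pts) (v : Int × Int) :
    v ∈ PySem.Dict.values d ↔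
      v ∈ pts ∧ ¬(negp v ∈ pts ∧ toLex (negp v) < toLex v) := by
  obtain ⟨hnd, hitems, hcont⟩ := h
  have hvals : PySem.Dict.values d = d.items.map (·.2) := rfl
  constructor
  · intro hv
    rw [hvals, List.mem_map] at hv
    obtain ⟨kv, hkv, rfl⟩ := hv
    obtain ⟨h1, h2, h3⟩ := hitems kv hkv
    refine ⟨h2, ?_⟩
    rintro ⟨hin, hlt⟩
    have := h3 (negp kv.2) hin (by rw [canonp_negp, ← h1])
    exact absurd hlt (not_lt.mpr this)
  · rintro ⟨hv, hmin⟩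
    have hc := hcont v hv
    rw [PySem.Dict.contains_eq_isSome_get?] at hc
    rcases hg : PySem.Dict.get? d (canonp v) with _ | b
    · rw [hg] at hc
      exact absurd hc (by simp)
    · have hb : (canonp v, b) ∈ d.items := PySem.Dict.mem_items_of_get?_eq_some d hg
      obtain ⟨h1, h2, h3⟩ := hitems _ hb
      have hle1 : toLex b ≤ toLex v := h3 v hv rfl
      have hbv : b = v := by
        rcases (canonp_eq_iff b v).mp h1.symm with rfl | hbneg
        · rfl
        · rcases eq_or_lt_of_le hle1 with he | hlt'
          · exact toLex.injective he
          · exfalso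
            refine hmin ⟨?_, ?_⟩
            · rw [← hbneg]
              exact h2
            · rw [← hbneg]
              exact hlt'
      rw [hvals, List.mem_map]
      exact ⟨(canonp v, b), hb, hbv⟩

-- the values of the final dict are pairwise distinct
theorem nodup_values_best (pts : List (Int × Int))
    (d : PySem.Dict (Int × Int) (Int × Int)) (h : InvB d pts) :
    (PySem.Dict.values d).Nodup := by
  obtain ⟨hnd, hitems, _⟩ := h
  have hkeys : d.keys = (d.items.map (·.2)).map canonp := by
    have hk : d.keys = d.items.map (·.1) := rfl
    rw [hk, List.map_map]
    exact List.map_congr_left fun kv hkv => (hitems kv hkv).1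
  rw [hkeys] at hnd
  have hv : PySem.Dict.values d = d.items.map (·.2) := rfl
  rw [hv]
  exact hnd.of_map canonp

-- ===== VERDICT (by name: the statement is the Claim_ definition above) =====
theorem opposite_pairs_spec : Claim_equal_opposite_pairs := by
  intro points _
  unfold Spec_opposite_pairs
  -- A's side
  have hA : opposite_pairs points
      = gA [] (PySem.List.sorted points (fun p => toLex p)) := by
    unfold opposite_pairs
    rw [sorted2_eq_sorted_lex]
    exact foldA_eq_gA _ [] [] PySem.Set.empty (by simp [PySem.Set.empty])
  have hchar := gA_char points (PySem.List.sorted points (fun p => toLex p)) []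
    (PySem.List.sorted_pairwise points (fun p => toLex p))
    (by simp) (fun u => by simp [PySem.List.mem_sorted])
  -- the common target list
  set Lfilter := (ddup [] (PySem.List.sorted points (fun p => toLex p))).filter
      (fun v => decide ¬(negp v ∈ points ∧ toLex (negp v) < toLex v)) with hLf
  -- B's side dict
  have hinv : InvB (List.foldl stepB PySem.Dict.empty points) points := by
    simpa using invB_fold points [] PySem.Dict.empty invB_empty
  set best := List.foldl stepB PySem.Dict.empty points with hbest
  have hBdef : opposite_pairs_alt points
      = (PySem.List.sorted2 (PySem.Dict.values best) Prod.fst Prod.snd).map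
          (fun v => (v, negp v)) := rfl
  -- the sorted values equal Lfilter
  have hLmem : ∀ v, v ∈ Lfilter ↔
      v ∈ points ∧ ¬(negp v ∈ points ∧ toLex (negp v) < toLex v) := by
    intro v
    rw [hLf, List.mem_filter, mem_ddup, decide_eq_true_eq]
    simp [PySem.List.mem_sorted]
  have hLnd : Lfilter.Nodup := (nodup_ddup _ _).filter _
  have hLlt : Lfilter.Pairwise (fun a b => toLex a < toLex b) := by
    have hle : (ddup [] (PySem.List.sorted points (fun p => toLex p))).Pairwise
        (fun a b => toLex a ≤ toLex b) :=
      (PySem.List.sorted_pairwise points (fun p => toLex p)).sublist (ddup_sublist _ _)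
    have hne : Lfilter.Pairwise (fun a b => a ≠ b) := hLnd
    have hle' : Lfilter.Pairwise (fun a b => toLex a ≤ toLex b) :=
      hle.sublist List.filter_sublist
    exact (hle'.and hne).imp fun {a b} h =>
      lt_of_le_of_ne h.1 fun he => h.2 (toLex.injective he)
  have hperm : Lfilter.Perm (PySem.Dict.values best) := by
    refine (List.perm_ext_iff_of_nodup hLnd (nodup_values_best points best hinv)).mpr ?_
    intro v
    rw [hLmem v, mem_values_best points best hinv v]
  have hsorted : PySem.List.sorted2 (PySem.Dict.values best) Prod.fst Prod.snd = Lfilter := by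
    rw [sorted2_eq_sorted_lex]
    exact PySem.List.sorted_eq_of_perm_of_pairwise_lt _ _ _ hperm hLlt
  rw [hA, hchar, hBdef, hsorted]
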